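-- pv_equiv track=rewrite | github.com/vivibui/Emergency-Room-Simulation | Patient_Only/AuxiliaryV1.py | CalProbeOrder
-- ===== SOURCE A (Python) =====
-- def CalProbeOrder(probes):
--     all_probes = []
--     probes_order = []
--     flag_probe = 0
--     for i in range(probes):
--         j = i + 1
--         all_probes.append((j))
--     while all_probes:
--         if flag_probe == 0:
--             probes_order.append(all_probes.pop(0))
--             flag_probe = 1
--         else:
--             probes_order.append(all_probes.pop(-1))
--             flag_probe = 0
--     return probes_order
-- ===== SOURCE B (Python) =====
-- def CalProbeOrder(probes):
--     # Two pointers walking inward, alternating front/back; O(n) vs A's O(n^2) pops.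
--     res = []
--     lo, hi = 1, probes
--     while lo < hi:
--         res.append(lo)
--         res.append(hi)
--         lo += 1
--         hi -= 1
--     if lo == hi:
--         res.append(lo)
--     return res
-- ===== Notes on version B (the rewrite author's own statement) =====
-- stated objective: faster
-- what changed: Replaces building a list and alternately popping its front (an O(n) shift each time) with two index pointers walking inward and plain appends.
import Mathlib
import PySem

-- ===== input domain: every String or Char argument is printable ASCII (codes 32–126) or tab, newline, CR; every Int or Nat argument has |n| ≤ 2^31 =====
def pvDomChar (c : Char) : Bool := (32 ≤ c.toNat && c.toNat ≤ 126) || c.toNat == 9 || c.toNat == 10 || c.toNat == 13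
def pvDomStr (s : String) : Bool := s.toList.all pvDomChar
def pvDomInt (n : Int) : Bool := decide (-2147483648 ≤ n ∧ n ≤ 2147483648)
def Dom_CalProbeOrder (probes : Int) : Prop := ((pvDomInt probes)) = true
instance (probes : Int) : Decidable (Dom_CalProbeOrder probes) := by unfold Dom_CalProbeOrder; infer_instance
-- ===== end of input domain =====

-- B replaces A's alternate pop-front/pop-back of a built list with two pointers walking inward (faster: asymptotic, O(n) vs O(n^2)).

-- ===== PORT A =====
-- while all_probes: pop(0) when flag==0 else pop(-1)
def CalProbeOrderLoopA : List Int → Int → List Int → List Int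
  | [], _, probes_order => probes_order
  | x :: rest, flag, probes_order =>
    if flag = 0 then
      CalProbeOrderLoopA rest 1 (probes_order ++ [x])
    else
      CalProbeOrderLoopA ((x :: rest).dropLast) 0
        (probes_order ++ [(x :: rest).getLast (by simp)])
termination_by l _ _ => l.length
decreasing_by
  · simp
  · simp [List.length_dropLast]

def CalProbeOrder (probes : Int) : List Int :=
  let all_probes := (PySem.List.pyRange 0 probes 1).foldl (fun acc i => acc ++ [i + 1]) []
  CalProbeOrderLoopA all_probes 0 []

-- ===== PORT B =====
def CalProbeOrderLoopB (lo hi : Int) (res : List Int) : List Int :=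
  if lo < hi then
    CalProbeOrderLoopB (lo + 1) (hi - 1) (res ++ [lo, hi])
  else if lo = hi then res ++ [lo]
  else res
termination_by (hi - lo).toNat
decreasing_by omega

def CalProbeOrder_alt (probes : Int) : List Int :=
  CalProbeOrderLoopB 1 probes []

-- ===== PRECONDITION & SPEC =====
def Spec_CalProbeOrder (probes : Int) (out : List Int) : Prop := out = CalProbeOrder_alt probes
instance (probes : Int) (out : List Int) : Decidable (Spec_CalProbeOrder probes out) := by unfold Spec_CalProbeOrder; infer_instance

-- ===== CLAIM (what is proved, stated in full; the proofs are below) =====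
def Claim_equal_CalProbeOrder : Prop := ∀ (probes : Int), Dom_CalProbeOrder probes → Spec_CalProbeOrder probes (CalProbeOrder probes)

-- ===== LEMMAS AND PROOFS =====

-- the for loop builds the range [a+1, b+1)
lemma foldl_build (a b : Int) (acc : List Int) :
    (PySem.List.pyRange a b 1).foldl (fun acc i => acc ++ [i + 1]) acc
      = acc ++ PySem.List.pyRange (a + 1) (b + 1) 1 := by
  by_cases h : b ≤ a
  · rw [PySem.List.pyRange_one_eq_nil h, PySem.List.pyRange_one_eq_nil (by omega)]
    simp
  · push Not at h
    have : ((b + 1) - (a + 1)).toNat < ((b) - a + 1).toNat := by omega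
    rw [PySem.List.pyRange_one_cons h, PySem.List.pyRange_one_cons (show a + 1 < b + 1 by omega)]
    simp only [List.foldl_cons]
    rw [foldl_build (a + 1) b]
    simp
termination_by (b - a).toNat
decreasing_by omega

lemma range_getLast (lo hi : Int) (h : lo ≤ hi) (hne) :
    (PySem.List.pyRange lo (hi + 1) 1).getLast hne = hi := by
  revert hne
  rw [PySem.List.pyRange_one_succ_right h]
  intro hne
  exact List.getLast_concat

lemma range_dropLast (lo hi : Int) (h : lo ≤ hi) :
    (PySem.List.pyRange lo (hi + 1) 1).dropLast = PySem.List.pyRange lo hi 1 := by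
  rw [PySem.List.pyRange_one_succ_right h]
  simp

-- pop(0) and pop(-1) steps of A's loop
lemma loopA_pop0 (x : Int) (rest : List Int) (acc : List Int) :
    CalProbeOrderLoopA (x :: rest) 0 acc = CalProbeOrderLoopA rest 1 (acc ++ [x]) := by
  rw [CalProbeOrderLoopA]; simp

lemma loopA_pop1 (l : List Int) (h : l ≠ []) (acc : List Int) :
    CalProbeOrderLoopA l 1 acc
      = CalProbeOrderLoopA l.dropLast 0 (acc ++ [l.getLast h]) := by
  cases l with
  | nil => exact absurd rfl h
  | cons x rest => rw [CalProbeOrderLoopA]; simp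

-- the two loops agree on the interval [lo, hi]
lemma loopA_eq_loopB (lo hi : Int) (acc : List Int) :
    CalProbeOrderLoopA (PySem.List.pyRange lo (hi + 1) 1) 0 acc
      = CalProbeOrderLoopB lo hi acc := by
  by_cases h : hi < lo
  · rw [PySem.List.pyRange_one_eq_nil (by omega)]
    rw [CalProbeOrderLoopA, CalProbeOrderLoopB]
    simp [show ¬ lo < hi by omega, show ¬ lo = hi by omega]
  · push Not at h
    rw [PySem.List.pyRange_one_cons (show lo < hi + 1 by omega), loopA_pop0]
    by_cases heq : lo = hi
    · subst heq
      rw [PySem.List.pyRange_one_eq_nil (by omega)]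
      rw [CalProbeOrderLoopA, CalProbeOrderLoopB]
      simp
    · have hlt : lo < hi := lt_of_le_of_ne h heq
      have hne : PySem.List.pyRange (lo + 1) (hi + 1) 1 ≠ [] := by
        rw [PySem.List.pyRange_one_cons (by omega)]; simp
      rw [loopA_pop1 _ hne,
          range_getLast (lo + 1) hi (by omega) hne,
          range_dropLast (lo + 1) hi (by omega)]
      rw [show PySem.List.pyRange (lo + 1) hi 1
            = PySem.List.pyRange (lo + 1) ((hi - 1) + 1) 1 by ring_nf]
      rw [loopA_eq_loopB (lo + 1) (hi - 1)]
      conv_rhs => rw [CalProbeOrderLoopB]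
      simp [hlt]
termination_by (hi + 1 - lo).toNat
decreasing_by omega

-- ===== VERDICT (by name: the statement is the Claim_ definition above) =====
theorem CalProbeOrder_spec : Claim_equal_CalProbeOrder := by
  intro probes _
  unfold Spec_CalProbeOrder CalProbeOrder CalProbeOrder_alt
  rw [foldl_build]
  simpa using loopA_eq_loopB 1 probes []
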